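-- pv_equiv track=rewrite | github.com/DiamondLightSource/Opt-ID | IDSort/src/v2/id_setup.py | create_flip_matrix_list_symmetric_apple_q2
-- ===== SOURCE A (Python) =====
-- def create_flip_matrix_list_symmetric_apple_q2(nperiods):
--     flip = []
--     for i in range(0, (4 * nperiods - 1) - 3, 4):
--         flip.append(((-1,0,0),(0,-1,0),(0,0,1)))
--         flip.append(((1,0,0),(0,1,0),(0,0,1)))
--         flip.append(((-1,0,0),(0,-1,0),(0,0,1)))
--         flip.append(((1,0,0),(0,1,0),(0,0,1)))
--
--     # Append last elements
--
--     flip.append(((-1,0,0),(0,-1,0),(0,0,1)))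
--     flip.append(((1,0,0),(0,1,0),(0,0,1)))
--     flip.append(((-1,0,0),(0,-1,0),(0,0,1)))
--     return flip
-- ===== SOURCE B (Python) =====
-- MINUS = ((-1, 0, 0), (0, -1, 0), (0, 0, 1))
-- PLUS = ((1, 0, 0), (0, 1, 0), (0, 0, 1))
--
--
-- def create_flip_matrix_list_symmetric_apple_q2(nperiods):
--     n = 4 * max(0, nperiods - 1) + 3
--     return [MINUS if i % 2 == 0 else PLUS for i in range(n)]
-- ===== Notes on version B (the rewrite author's own statement) =====
-- stated objective: simpler
-- what changed: Replaces the per-period loop appending fixed four-element blocks plus a special three-element tail with a closed-form total length and a single comprehension filling the list by output-index parity.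
import Mathlib
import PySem

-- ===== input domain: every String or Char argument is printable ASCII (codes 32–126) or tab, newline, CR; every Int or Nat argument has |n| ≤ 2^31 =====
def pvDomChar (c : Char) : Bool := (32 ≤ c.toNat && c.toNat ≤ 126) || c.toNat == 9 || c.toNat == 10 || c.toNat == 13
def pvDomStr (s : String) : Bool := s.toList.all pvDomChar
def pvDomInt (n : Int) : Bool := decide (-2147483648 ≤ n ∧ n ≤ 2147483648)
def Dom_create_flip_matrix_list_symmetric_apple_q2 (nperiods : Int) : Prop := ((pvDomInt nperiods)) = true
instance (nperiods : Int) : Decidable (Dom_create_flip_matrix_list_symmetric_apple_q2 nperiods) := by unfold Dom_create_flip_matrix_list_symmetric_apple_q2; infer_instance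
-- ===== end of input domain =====

-- B fills the alternating flip list by output-index parity over a closed-form length,
-- instead of A's per-period 4-block appends plus a special 3-element tail (objective: simpler).

-- ===== PORT A =====
def create_flip_matrix_list_symmetric_apple_q2 (nperiods : Int) : List ((Int × Int × Int) × (Int × Int × Int) × (Int × Int × Int)) :=
  let flip := (PySem.List.pyRange 0 (4 * nperiods - 1 - 3) 4).foldl
    (fun acc _ => acc ++ [((-1,0,0),(0,-1,0),(0,0,1)), ((1,0,0),(0,1,0),(0,0,1)),
                          ((-1,0,0),(0,-1,0),(0,0,1)), ((1,0,0),(0,1,0),(0,0,1))]) []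
  flip ++ [((-1,0,0),(0,-1,0),(0,0,1)), ((1,0,0),(0,1,0),(0,0,1)), ((-1,0,0),(0,-1,0),(0,0,1))]

-- ===== PORT B =====
def pvMINUS : (Int × Int × Int) × (Int × Int × Int) × (Int × Int × Int) := ((-1,0,0),(0,-1,0),(0,0,1))
def pvPLUS : (Int × Int × Int) × (Int × Int × Int) × (Int × Int × Int) := ((1,0,0),(0,1,0),(0,0,1))

def create_flip_matrix_list_symmetric_apple_q2_alt (nperiods : Int) : List ((Int × Int × Int) × (Int × Int × Int) × (Int × Int × Int)) :=
  let n := 4 * max 0 (nperiods - 1) + 3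
  (PySem.List.pyRange 0 n 1).map (fun i => if PySem.Int.mod i 2 = 0 then pvMINUS else pvPLUS)

-- ===== PRECONDITION & SPEC =====
def Spec_create_flip_matrix_list_symmetric_apple_q2 (nperiods : Int) (out : List ((Int × Int × Int) × (Int × Int × Int) × (Int × Int × Int))) : Prop := out = create_flip_matrix_list_symmetric_apple_q2_alt nperiods
instance (nperiods : Int) (out : List ((Int × Int × Int) × (Int × Int × Int) × (Int × Int × Int))) : Decidable (Spec_create_flip_matrix_list_symmetric_apple_q2 nperiods out) := by unfold Spec_create_flip_matrix_list_symmetric_apple_q2; infer_instance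

-- ===== CLAIM (what is proved, stated in full; the proofs are below) =====
def Claim_equal_create_flip_matrix_list_symmetric_apple_q2 : Prop := ∀ (nperiods : Int), Dom_create_flip_matrix_list_symmetric_apple_q2 nperiods → Spec_create_flip_matrix_list_symmetric_apple_q2 nperiods (create_flip_matrix_list_symmetric_apple_q2 nperiods)

-- ===== LEMMAS AND PROOFS =====

-- B's parity comprehension over 4*m+3 indices is m alternating 4-blocks plus the 3 tail elements.
theorem pv_parity_blocks (m : Nat) :
    (List.range (4 * m + 3)).map (fun (k : Nat) => if PySem.Int.mod (0 + (k : Int)) 2 = 0 then pvMINUS else pvPLUS)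
      = (List.range m).flatMap (fun _ => [pvMINUS, pvPLUS, pvMINUS, pvPLUS]) ++ [pvMINUS, pvPLUS, pvMINUS] := by
  have hmod : ∀ (j : Nat), PySem.Int.mod (0 + (j : Int)) 2 = ((j % 2 : Nat) : Int) := by
    intro j
    simp
  induction m with
  | zero => decide
  | succ m ih =>
      have hr : 4 * (m + 1) + 3 = (4 * m + 3) + 4 := by omega
      rw [hr, List.range_add, List.map_append, ih]
      have h4 : (List.range 4).map
          ((fun (k : Nat) => if PySem.Int.mod (0 + (k : Int)) 2 = 0 then pvMINUS else pvPLUS) ∘ (fun x => (4 * m + 3) + x))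
          = [pvPLUS, pvMINUS, pvPLUS, pvMINUS] := by
        simp only [List.range_succ, List.range_zero, List.map_append, List.map_cons, List.map_nil,
          Function.comp_apply, hmod]
        have h0 : (4 * m + 3 + 0) % 2 = 1 := by omega
        have h1 : (4 * m + 3 + 1) % 2 = 0 := by omega
        have h2 : (4 * m + 3 + 2) % 2 = 1 := by omega
        have h3 : (4 * m + 3 + 3) % 2 = 0 := by omega
        simp [h0, h1, h2, h3]
      rw [List.map_map, h4, List.range_succ, List.flatMap_append]
      simp [List.append_assoc]

-- length of A's step-4 range is (nperiods - 1).toNat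
theorem pv_range4_len (np : Int) :
    PySem.List.pyRange 0 (4 * np - 1 - 3) 4
      = (List.range (np - 1).toNat).map (fun (k : Nat) => (0 : Int) + 4 * (k : Int)) := by
  rw [PySem.List.pyRange_of_pos 0 (4 * np - 1 - 3) (by norm_num)]
  have : (if (0:Int) < 4 * np - 1 - 3 then ((4 * np - 1 - 3 - 0 + 4 - 1) / 4).toNat else 0) = (np - 1).toNat := by
    split_ifs with h <;> omega
  rw [this]

theorem pv_main (np : Int) :
    create_flip_matrix_list_symmetric_apple_q2 np = create_flip_matrix_list_symmetric_apple_q2_alt np := by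
  unfold create_flip_matrix_list_symmetric_apple_q2 create_flip_matrix_list_symmetric_apple_q2_alt
  have hn : (4 * max 0 (np - 1) + 3 - 0).toNat = 4 * (np - 1).toNat + 3 := by omega
  simp only [pv_range4_len, PySem.List.foldl_append_eq_flatMap, List.flatMap_map,
    PySem.List.pyRange_one, List.map_map, hn, List.nil_append]
  have := pv_parity_blocks (np - 1).toNat
  simp only [Function.comp_def] at this ⊢
  rw [this]
  simp [pvMINUS, pvPLUS]

-- ===== VERDICT (by name: the statement is the Claim_ definition above) =====
theorem create_flip_matrix_list_symmetric_apple_q2_spec : Claim_equal_create_flip_matrix_list_symmetric_apple_q2 := by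
  intro np _
  exact pv_main np
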